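-- pv_equiv track=rewrite | github.com/SvenHinrichs/GitLabCI | bin/02_CITests/UnitTests/CheckPackages/validatetest.py | _CompareWhiteList
-- ===== SOURCE A (Python) =====
-- def _CompareWhiteList(WhiteList,
--                       AixLibModels):  # Compare AixLib models with IBPSA models of those have not  passed the Check. Remove all models from the WhiteList and will not be checked
--     WhiteListModel = []
--     for element in AixLibModels:
--         for subelement in WhiteList:
--             if element == subelement:
--                 WhiteListModel.append(element)
--     WhiteListModel = list(set(WhiteListModel))
--     for i in WhiteListModel:
--         AixLibModels.remove(i)
--     return AixLibModels
-- ===== SOURCE B (Python) =====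
-- def _CompareWhiteList(WhiteList, AixLibModels):
--     # One filtering pass: drop the first occurrence of every model that is on the
--     # whitelist; mutate AixLibModels in place (like A's .remove calls) and return it.
--     white = set(WhiteList)
--     seen = set()
--     result = []
--     for element in AixLibModels:
--         if element in white and element not in seen:
--             seen.add(element)
--         else:
--             result.append(element)
--     AixLibModels[:] = result
--     return AixLibModels
-- ===== Notes on version B (the rewrite author's own statement) =====
-- stated objective: faster
-- what changed: replaces the nested match loop, the set-dedup and the per-model list.remove passes with one filtering pass over AixLibModels that uses a prebuilt whitelist set and a seen set and writes the result back in place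
import Mathlib
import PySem

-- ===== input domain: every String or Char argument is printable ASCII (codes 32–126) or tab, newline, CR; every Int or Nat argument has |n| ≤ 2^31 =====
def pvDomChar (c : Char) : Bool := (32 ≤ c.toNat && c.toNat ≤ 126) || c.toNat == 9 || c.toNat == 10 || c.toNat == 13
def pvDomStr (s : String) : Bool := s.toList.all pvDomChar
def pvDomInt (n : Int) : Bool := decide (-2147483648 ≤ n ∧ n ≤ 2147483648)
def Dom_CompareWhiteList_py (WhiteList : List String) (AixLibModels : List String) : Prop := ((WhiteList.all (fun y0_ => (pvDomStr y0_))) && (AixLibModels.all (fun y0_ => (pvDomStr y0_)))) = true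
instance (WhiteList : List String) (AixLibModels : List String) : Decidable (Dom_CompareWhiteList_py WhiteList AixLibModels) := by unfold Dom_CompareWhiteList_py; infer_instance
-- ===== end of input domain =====

-- B replaces A's nested match loop + set-dedup + repeated list.remove with one
-- filtering pass (whitelist set + seen set); the equivalence proved is about the
-- RETURN value (both Pythons mutate AixLibModels in place to that same value).

-- ===== PORT A =====
def CompareWhiteList_py (WhiteList : List String) (AixLibModels : List String) : List String :=
  let WhiteListModel : List String :=
    AixLibModels.foldl (fun acc element =>
      WhiteList.foldl (fun acc2 subelement =>
        if element == subelement then acc2 ++ [element] else acc2) acc) []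
  let WhiteListModelSet : PySem.Set String := PySem.Set.ofList WhiteListModel
  -- AixLibModels.remove(i): i is always present here, so the `.getD` totality
  -- guard for the (never-raised) ValueError is never taken
  WhiteListModelSet.foldl (fun ax i => (PySem.List.remove? ax i).getD ax) AixLibModels

-- ===== PORT B =====
-- the single pass of Source B: drop the first not-yet-seen occurrence of a whitelisted model
def pvAltDrop (white : PySem.Set String) (seen : PySem.Set String) (xs : List String) : List String :=
  match xs with
  | [] => []
  | element :: rest =>
    if PySem.Set.contains white element && !(PySem.Set.contains seen element)
    then pvAltDrop white (PySem.Set.add seen element) rest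
    else element :: pvAltDrop white seen rest

def CompareWhiteList_py_alt (WhiteList : List String) (AixLibModels : List String) : List String :=
  pvAltDrop (PySem.Set.ofList WhiteList) PySem.Set.empty AixLibModels

-- ===== PRECONDITION & SPEC =====
def Spec_CompareWhiteList_py (WhiteList : List String) (AixLibModels : List String) (out : List String) : Prop := out = CompareWhiteList_py_alt WhiteList AixLibModels
instance (WhiteList : List String) (AixLibModels : List String) (out : List String) : Decidable (Spec_CompareWhiteList_py WhiteList AixLibModels out) := by unfold Spec_CompareWhiteList_py; infer_instance

-- ===== CLAIM (what is proved, stated in full; the proofs are below) =====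
def Claim_equal_CompareWhiteList_py : Prop := ∀ (WhiteList : List String) (AixLibModels : List String), Dom_CompareWhiteList_py WhiteList AixLibModels → Spec_CompareWhiteList_py WhiteList AixLibModels (CompareWhiteList_py WhiteList AixLibModels)

-- ===== LEMMAS AND PROOFS =====

-- the list of distinct whitelisted models of xs (first-occurrence order) not yet in `seen`
def pvSel (W : List String) (seen : PySem.Set String) (xs : List String) : List String :=
  match xs with
  | [] => []
  | x :: r =>
    if x ∈ W ∧ x ∉ seen then x :: pvSel W (PySem.Set.add seen x) r else pvSel W seen r

theorem pvSel_cons (W : List String) (seen : PySem.Set String) (x : String) (r : List String) :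
    pvSel W seen (x :: r)
      = if x ∈ W ∧ x ∉ seen then x :: pvSel W (PySem.Set.add seen x) r else pvSel W seen r := rfl

theorem pvAltDrop_cons (white seen : PySem.Set String) (x : String) (r : List String) :
    pvAltDrop white seen (x :: r)
      = if PySem.Set.contains white x && !(PySem.Set.contains seen x)
        then pvAltDrop white (PySem.Set.add seen x) r
        else x :: pvAltDrop white seen r := rfl

theorem pvSel_mem (W : List String) (seen : PySem.Set String) (xs : List String)
    (y : String) (hy : y ∈ pvSel W seen xs) : y ∈ W ∧ y ∉ seen := by
  induction xs generalizing seen with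
  | nil => simp [pvSel] at hy
  | cons x r ih =>
    rw [pvSel_cons] at hy
    by_cases h : x ∈ W ∧ x ∉ seen
    · rw [if_pos h] at hy
      rcases List.mem_cons.mp hy with hy | hy
      · exact hy ▸ h
      · have := ih _ hy
        refine ⟨this.1, fun hs => this.2 ?_⟩
        simp [PySem.Set.mem_add, hs]
    · rw [if_neg h] at hy
      exact ih _ hy

theorem pvFoldl_erase_cons (S : List String) (x : String) (r : List String)
    (hx : x ∉ S) : S.foldl (fun ax i => ax.erase i) (x :: r)
      = x :: S.foldl (fun ax i => ax.erase i) r := by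
  induction S generalizing r with
  | nil => rfl
  | cons s S' ih =>
    have hne : x ≠ s := fun h => hx (h ▸ List.mem_cons_self ..)
    simp only [List.foldl_cons]
    rw [List.erase_cons_tail (by simp [hne])]
    exact ih _ (fun h => hx (List.mem_cons_of_mem _ h))

theorem pvAltDrop_eq (W : List String) (seen : PySem.Set String) (xs : List String) :
    pvAltDrop (PySem.Set.ofList W) seen xs
      = (pvSel W seen xs).foldl (fun ax i => ax.erase i) xs := by
  induction xs generalizing seen with
  | nil => simp [pvAltDrop, pvSel]
  | cons x r ih =>
    rw [pvAltDrop_cons, pvSel_cons]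
    by_cases h : x ∈ W ∧ x ∉ seen
    · have hb : (PySem.Set.contains (PySem.Set.ofList W) x
          && !(PySem.Set.contains seen x)) = true := by
        simp only [Bool.and_eq_true, Bool.not_eq_true']
        exact ⟨(PySem.Set.contains_iff ..).mpr ((PySem.Set.mem_ofList ..).mpr h.1),
          by simpa using fun hc => h.2 ((PySem.Set.contains_iff ..).mp hc)⟩
      rw [hb, if_pos rfl, if_pos h, List.foldl_cons, List.erase_cons_head]
      exact ih _
    · have hb : (PySem.Set.contains (PySem.Set.ofList W) x
          && !(PySem.Set.contains seen x)) = false := by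
        rcases not_and_or.mp h with h1 | h1
        · simp [PySem.Set.mem_ofList, h1]
        · simp [not_not.mp h1]
      rw [hb, if_neg (by simp), if_neg h,
        pvFoldl_erase_cons _ _ _ (fun hm => h (pvSel_mem W seen r x hm)), ih]

-- a nonempty block of copies of e folds into a single Set.add
theorem pvFoldl_add_block (bl : List String) (e : String) (s : PySem.Set String)
    (hne : bl ≠ []) (hall : ∀ y ∈ bl, y = e) :
    bl.foldl PySem.Set.add s = PySem.Set.add s e := by
  induction bl generalizing s with
  | nil => exact absurd rfl hne
  | cons b t ih =>
    have hb : b = e := hall b (List.mem_cons_self ..)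
    subst hb
    rcases eq_or_ne t [] with h | h
    · simp [h]
    · simp only [List.foldl_cons]
      rw [ih (PySem.Set.add s b) (by rintro rfl; simp_all) (fun y hy => hall y (List.mem_cons_of_mem _ hy))]
      exact PySem.Set.add_of_mem (by simp [PySem.Set.mem_add])

theorem pvFoldl_add_flatMap (W : List String) (g : String → List String)
    (hg : ∀ x, (g x ≠ [] ↔ x ∈ W) ∧ ∀ y ∈ g x, y = x)
    (xs : List String) (s : PySem.Set String) :
    (xs.flatMap g).foldl PySem.Set.add s
      = (xs.filter (fun x => decide (x ∈ W))).foldl PySem.Set.add s := by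
  induction xs generalizing s with
  | nil => rfl
  | cons x r ih =>
    simp only [List.flatMap_cons, List.foldl_append, List.filter_cons]
    by_cases hx : x ∈ W
    · rw [pvFoldl_add_block (g x) x s ((hg x).1.mpr hx) (hg x).2,
        if_pos (by simpa using hx), List.foldl_cons]
      exact ih _
    · have hgx : g x = [] := by
        by_contra hne
        exact hx ((hg x).1.mp hne)
      rw [hgx, if_neg (by simpa using hx)]
      exact ih _

theorem pvFilter_foldl_add_eq_sel (W : List String) (xs : List String)
    (s : PySem.Set String) (hs : s.Nodup) :
    (xs.filter (fun x => decide (x ∈ W))).foldl PySem.Set.add s = s ++ pvSel W s xs := by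
  induction xs generalizing s with
  | nil => simp [pvSel]
  | cons x r ih =>
    rw [List.filter_cons, pvSel_cons]
    by_cases hxW : x ∈ W
    · rw [if_pos (by simpa using hxW)]
      by_cases hxs : x ∈ s
      · rw [if_neg (by simp [hxs]), List.foldl_cons, PySem.Set.add_of_mem hxs]
        exact ih s hs
      · rw [if_pos ⟨hxW, hxs⟩, List.foldl_cons,
          ih (PySem.Set.add s x) (PySem.Set.nodup_add s x hs),
          PySem.Set.add_of_not_mem hxs]
        simp
    · rw [if_neg (by simpa using hxW), if_neg (by simp [hxW])]
      exact ih s hs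

-- ===== VERDICT (by name: the statement is the Claim_ definition above) =====
theorem CompareWhiteList_py_spec : Claim_equal_CompareWhiteList_py := by
  intro W A _
  show CompareWhiteList_py W A = CompareWhiteList_py_alt W A
  unfold CompareWhiteList_py CompareWhiteList_py_alt
  -- the remove-loop body is List.erase
  have hstep : (fun (ax : List String) (i : String) => (PySem.List.remove? ax i).getD ax)
      = fun ax i => ax.erase i := by
    funext ax i
    by_cases h : i ∈ ax
    · rw [PySem.List.remove?_eq_some_erase ax i h]; rfl
    · rw [(PySem.List.remove?_eq_none_iff ax i).mpr h, List.erase_of_not_mem h]; rfl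
  -- the nested match loops build the flatMap of per-element blocks
  have hinner : (fun (acc : List String) (element : String) =>
        W.foldl (fun acc2 subelement =>
          if element == subelement then acc2 ++ [element] else acc2) acc)
      = fun acc element =>
        acc ++ (W.filter (fun s => element == s)).map (fun _ => element) := by
    funext acc element
    exact PySem.List.foldl_append_if (fun s => element == s) (fun _ => element) W acc
  have hg : ∀ x, ((W.filter (fun s => x == s)).map (fun _ => x) ≠ [] ↔ x ∈ W)
      ∧ ∀ y ∈ (W.filter (fun s => x == s)).map (fun _ => x), y = x := by
    intro x
    refine ⟨?_, ?_⟩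
    · simp only [ne_eq, List.map_eq_nil_iff, List.filter_eq_nil_iff]
      constructor
      · intro h
        by_contra hx
        exact h (fun s hs hb => hx ((beq_iff_eq ..).mp hb ▸ hs))
      · intro hx h
        exact (h x hx) (by simp)
    · intro y hy
      rcases List.mem_map.mp hy with ⟨_, _, h2⟩
      exact h2.symm
  simp only [hstep, hinner]
  rw [show (A.foldl (fun acc element =>
        acc ++ (W.filter (fun s => element == s)).map (fun _ => element)) []) =
        A.flatMap (fun element => (W.filter (fun s => element == s)).map (fun _ => element)) by
        simpa using PySem.List.foldl_append_eq_flatMap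
          (fun element => (W.filter (fun s => element == s)).map (fun _ => element)) A []]
  rw [PySem.Set.ofList_eq_foldl,
    pvFoldl_add_flatMap W _ hg A [],
    pvFilter_foldl_add_eq_sel W A [] List.nodup_nil,
    List.nil_append, ← pvAltDrop_eq]
  rfl
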